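-- pv_equiv track=rewrite | github.com/Tony-sama/pylfit | tests/examples/sequences_learning/sequence_properties.py | succession
-- ===== SOURCE A (Python) =====
-- def succession(events, sequence):
--     features = []
--     values = []
--     for ei in sorted(events):
--         for ej in sorted(events):
--             if(ei == ej):
--                 continue
--             features.append("succession_"+str(ei)+"_"+str(ej))
--             ei_indices = [i for i, x in enumerate(sequence) if x == ei] + [-1]
--             ej_indices = [i for i, x in enumerate(sequence) if x == ej] + [-1]
--
--             last_ei = max(ei_indices)
--             last_ej = max(ej_indices)
--
--             a_before_b = (ej not in sequence) or (last_ej > last_ei)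
--             response_a_b = last_ei <= last_ej
--             values.append(response_a_b  and a_before_b)
--     return features, values
-- ===== SOURCE B (Python) =====
-- def succession(events, sequence):
--     # One pass over the sequence records each value's last index; pairs are then O(1) each.
--     last = {}
--     for i, x in enumerate(sequence):
--         last[x] = i
--     es = sorted(events)
--     pairs = [(ei, ej) for ei in es for ej in es if ei != ej]
--     features = ["succession_" + str(ei) + "_" + str(ej) for ei, ej in pairs]
--     values = [last.get(ei, -1) <= last.get(ej, -1) for ei, ej in pairs]
--     return features, values
-- ===== Notes on version B (the rewrite author's own statement) =====
-- stated objective: faster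
-- what changed: B precomputes each value's last index in one dict pass over the sequence and evaluates each ordered event pair in O(1) (the pair's convoluted boolean reduces to comparing last indices), instead of A's two full sequence scans plus max per pair.
import Mathlib
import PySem

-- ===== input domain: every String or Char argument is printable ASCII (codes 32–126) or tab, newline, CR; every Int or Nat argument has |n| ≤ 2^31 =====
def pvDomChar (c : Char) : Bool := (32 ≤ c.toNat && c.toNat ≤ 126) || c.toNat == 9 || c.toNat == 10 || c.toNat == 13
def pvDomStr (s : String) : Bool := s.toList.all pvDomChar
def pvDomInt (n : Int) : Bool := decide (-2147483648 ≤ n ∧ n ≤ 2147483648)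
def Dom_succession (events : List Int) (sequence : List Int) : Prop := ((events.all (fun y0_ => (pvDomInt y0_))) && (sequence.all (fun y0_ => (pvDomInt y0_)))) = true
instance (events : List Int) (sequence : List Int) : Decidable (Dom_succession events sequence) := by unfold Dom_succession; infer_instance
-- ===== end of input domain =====

-- B precomputes each value's last index in one dict pass, then evaluates each ordered event
-- pair in O(1), instead of A's per-pair sequence scans (objective: faster, asymptotic).


-- ===== PORT A =====
-- literal transliteration: nested loops over sorted(events), per pair two comprehension
-- scans of `sequence`, max(... + [-1]), membership test, append to both output lists
def succession (events : List Int) (sequence : List Int) : List String × List Bool :=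
  (PySem.List.sorted events (fun x => x) false).foldl (fun acc ei =>
    (PySem.List.sorted events (fun x => x) false).foldl (fun acc ej =>
      if ei == ej then acc
      else
        let ei_indices := (((PySem.List.enumerate sequence).filter (fun p => p.2 == ei)).map (fun p => p.1)) ++ [(-1 : Int)]
        let ej_indices := (((PySem.List.enumerate sequence).filter (fun p => p.2 == ej)).map (fun p => p.1)) ++ [(-1 : Int)]
        let last_ei := (PySem.List.max? ei_indices (fun x => x)).getD (-1)
        let last_ej := (PySem.List.max? ej_indices (fun x => x)).getD (-1)
        let a_before_b := !(sequence.contains ej) || decide (last_ej > last_ei)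
        let response_a_b := decide (last_ei ≤ last_ej)
        (acc.1 ++ ["succession_" ++ PySem.Int.toStr ei ++ "_" ++ PySem.Int.toStr ej],
         acc.2 ++ [response_a_b && a_before_b])) acc)
    (([], []) : List String × List Bool)

-- ===== PORT B =====
-- one dict pass records each value's last index; then comprehensions over the pair list
def succession_alt (events : List Int) (sequence : List Int) : List String × List Bool :=
  let last := (PySem.List.enumerate sequence).foldl
      (fun (d : PySem.Dict Int Int) p => d.insert p.2 p.1) PySem.Dict.empty
  let es := PySem.List.sorted events (fun x => x) false
  let pairs := es.flatMap (fun ei => (es.filter (fun ej => !(ei == ej))).map (fun ej => (ei, ej)))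
  (pairs.map (fun p => "succession_" ++ PySem.Int.toStr p.1 ++ "_" ++ PySem.Int.toStr p.2),
   pairs.map (fun p => decide (last.getD p.1 (-1) ≤ last.getD p.2 (-1))))

-- ===== PRECONDITION & SPEC =====
def Spec_succession (events : List Int) (sequence : List Int) (out : List String × List Bool) : Prop := out = succession_alt events sequence
instance (events : List Int) (sequence : List Int) (out : List String × List Bool) : Decidable (Spec_succession events sequence out) := by unfold Spec_succession; infer_instance

-- ===== CLAIM (what is proved, stated in full; the proofs are below) =====
def Claim_equal_succession : Prop := ∀ (events : List Int) (sequence : List Int), Dom_succession events sequence → Spec_succession events sequence (succession events sequence)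




-- ===== LEMMAS AND PROOFS =====

-- A's per-pair "last index" expression: max of the matching positions, -1 appended
def lastA (sequence : List Int) (e : Int) : Int :=
  (PySem.List.max? ((((PySem.List.enumerate sequence).filter (fun p => p.2 == e)).map (fun p => p.1)) ++ [(-1 : Int)]) (fun x => x)).getD (-1)

-- B's "last index": lookup in the dict built by the one-pass loop
def lastB (sequence : List Int) (e : Int) : Int :=
  ((PySem.List.enumerate sequence).foldl (fun (d : PySem.Dict Int Int) p => d.insert p.2 p.1) PySem.Dict.empty).getD e (-1)

-- A's per-pair boolean, verbatim
def valA (sequence : List Int) (ei ej : Int) : Bool :=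
  decide (lastA sequence ei ≤ lastA sequence ej) &&
    (!(sequence.contains ej) || decide (lastA sequence ej > lastA sequence ei))

def featA (ei ej : Int) : String :=
  "succession_" ++ PySem.Int.toStr ei ++ "_" ++ PySem.Int.toStr ej

lemma maxD_append_neg_one (l : List Int) :
    (PySem.List.max? (l ++ [(-1 : Int)]) (fun x => x)).getD (-1) = l.foldl max (-1) := by
  cases l with
  | nil => decide
  | cons x t =>
      rw [List.cons_append, PySem.List.max?_id_cons, Option.getD_some, List.foldl_append,
        List.foldl_cons, List.foldl_nil, List.foldl_cons,
        max_comm (List.foldl max x t) (-1)]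
      exact (List.foldl_assoc).symm

lemma foldl_filter_max_eq_dict (sequence : List Int) (e : Int) :
    ∀ (s a : Int) (d : PySem.Dict Int Int), a ≤ s → d.getD e (-1) = a →
    (((PySem.List.enumerate sequence s).filter (fun p => p.2 == e)).map (fun p => p.1)).foldl max a
      = ((PySem.List.enumerate sequence s).foldl (fun (d : PySem.Dict Int Int) p => d.insert p.2 p.1) d).getD e (-1) := by
  induction sequence with
  | nil => intro s a d _ hd; simpa [PySem.List.enumerate] using hd.symm
  | cons x xs ih =>
      intro s a d hs hd
      rw [PySem.List.enumerate_cons]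
      by_cases hx : x = e
      · subst hx
        simp only [List.filter_cons, List.map_cons, List.foldl_cons, BEq.rfl, if_true]
        rw [ih (s + 1) (max a s) (d.insert x s) (by omega)
          (by rw [PySem.Dict.getD_insert_self]; omega)]
      · simp only [List.filter_cons, List.foldl_cons]
        have hbe : ((s, x).2 == e) = false := by simpa using hx
        simp only [hbe, Bool.false_eq_true, if_false]
        exact ih (s + 1) a (d.insert x s) (by omega)
          (by rw [PySem.Dict.getD_insert_of_ne _ _ _ (fun h : e = x => hx h.symm)]; exact hd)

lemma lastA_eq_lastB (sequence : List Int) (e : Int) :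
    lastA sequence e = lastB sequence e := by
  rw [lastA, lastB, maxD_append_neg_one]
  exact foldl_filter_max_eq_dict sequence e 0 (-1) PySem.Dict.empty (by omega)
    (by rw [PySem.Dict.getD_empty])

lemma dict_fold_not_mem (e : Int) : ∀ (xs : List Int), e ∉ xs →
    ∀ (s : Int) (d : PySem.Dict Int Int),
      ((PySem.List.enumerate xs s).foldl (fun (d : PySem.Dict Int Int) p => d.insert p.2 p.1) d).getD e (-1)
        = d.getD e (-1) := by
  intro xs
  induction xs with
  | nil => intro _ s d; simp [PySem.List.enumerate]
  | cons x xs ih =>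
      intro h s d
      simp only [List.mem_cons, not_or] at h
      rw [PySem.List.enumerate_cons, List.foldl_cons, ih h.2 (s + 1)]
      exact PySem.Dict.getD_insert_of_ne _ _ _ h.1

lemma lastB_of_not_mem (sequence : List Int) (e : Int) (h : e ∉ sequence) :
    lastB sequence e = -1 := by
  rw [lastB, dict_fold_not_mem e sequence h 0 PySem.Dict.empty, PySem.Dict.getD_empty]

lemma lastB_of_mem (sequence : List Int) (e : Int) (h : e ∈ sequence) :
    ∃ (k : Nat) (hk : k < sequence.length), sequence[k] = e ∧ lastB sequence e = k := by
  rw [lastB]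
  have hgen : ∀ (xs : List Int), e ∈ xs → ∀ (s : Int) (d : PySem.Dict Int Int),
      ∃ (k : Nat) (hk : k < xs.length), xs[k] = e ∧
        ((PySem.List.enumerate xs s).foldl (fun (d : PySem.Dict Int Int) p => d.insert p.2 p.1) d).getD e (-1) = s + k := by
    intro xs
    induction xs with
    | nil => intro hmem; exact absurd hmem (List.not_mem_nil)
    | cons x xs ih =>
        intro hmem s d
        rw [PySem.List.enumerate_cons, List.foldl_cons]
        by_cases hxs : e ∈ xs
        · obtain ⟨k, hk, he, hv⟩ := ih hxs (s + 1) (d.insert x s)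
          exact ⟨k + 1, by simpa using hk, by simpa using he, by rw [hv]; omega⟩
        · have hx : x = e := by
            rcases List.mem_cons.mp hmem with h1 | h2
            · exact h1.symm
            · exact absurd h2 hxs
          refine ⟨0, by simp, by simpa using hx, ?_⟩
          rw [dict_fold_not_mem e xs hxs (s + 1) _, hx, PySem.Dict.getD_insert_self]
          omega
  obtain ⟨k, hk, he, hv⟩ := hgen sequence h 0 PySem.Dict.empty
  exact ⟨k, hk, he, by rw [hv]; omega⟩

-- per-pair value equality: A's convoluted boolean is exactly "lastB ei ≤ lastB ej"
lemma valA_eq (sequence : List Int) (ei ej : Int) (hne : ei ≠ ej) :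
    valA sequence ei ej = decide (lastB sequence ei ≤ lastB sequence ej) := by
  rw [valA, lastA_eq_lastB, lastA_eq_lastB]
  by_cases hj : ej ∈ sequence
  · have hcj : sequence.contains ej = true := by simpa using hj
    obtain ⟨kj, hkj, hej, hvj⟩ := lastB_of_mem sequence ej hj
    have hne' : lastB sequence ei ≠ lastB sequence ej := by
      by_cases hi : ei ∈ sequence
      · obtain ⟨ki, hki, hei, hvi⟩ := lastB_of_mem sequence ei hi
        intro hcontra
        rw [hvi, hvj] at hcontra
        have : ki = kj := by omega
        subst this
        exact hne (hei ▸ hej ▸ rfl)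
      · rw [lastB_of_not_mem sequence ei hi, hvj]; omega
    rw [hcj]
    by_cases hle : lastB sequence ei ≤ lastB sequence ej
    · have hlt : lastB sequence ej > lastB sequence ei := by omega
      simp [hle, hlt]
    · simp [hle]
  · have hcj : sequence.contains ej = false := by simpa using hj
    rw [hcj]
    simp

-- A's inner loop over m appends one feature and one value per ej ≠ ei
lemma inner_loop_shape (sequence : List Int) (ei : Int) (m : List Int) :
    ∀ (acc : List String × List Bool),
    m.foldl (fun acc ej =>
      if ei == ej then acc
      else
        let ei_indices := (((PySem.List.enumerate sequence).filter (fun p => p.2 == ei)).map (fun p => p.1)) ++ [(-1 : Int)]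
        let ej_indices := (((PySem.List.enumerate sequence).filter (fun p => p.2 == ej)).map (fun p => p.1)) ++ [(-1 : Int)]
        let last_ei := (PySem.List.max? ei_indices (fun x => x)).getD (-1)
        let last_ej := (PySem.List.max? ej_indices (fun x => x)).getD (-1)
        let a_before_b := !(sequence.contains ej) || decide (last_ej > last_ei)
        let response_a_b := decide (last_ei ≤ last_ej)
        (acc.1 ++ ["succession_" ++ PySem.Int.toStr ei ++ "_" ++ PySem.Int.toStr ej],
         acc.2 ++ [response_a_b && a_before_b])) acc
    = (acc.1 ++ (m.filter (fun ej => !(ei == ej))).map (featA ei),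
       acc.2 ++ (m.filter (fun ej => !(ei == ej))).map (valA sequence ei)) := by
  induction m with
  | nil => intro acc; simp
  | cons y t ih =>
      intro acc
      rw [List.foldl_cons, List.filter_cons]
      by_cases hy : ei = y
      · have : (ei == y) = true := by simpa using hy
        simp only [this, if_true, Bool.not_true, Bool.false_eq_true, if_false]
        exact ih acc
      · have : (ei == y) = false := by simpa using hy
        simp only [this, Bool.false_eq_true, if_false, Bool.not_false, if_true,
          List.map_cons]
        rw [ih]
        simp only [List.append_assoc, List.singleton_append]
        rfl

-- A's outer loop concatenates the inner loop's output blocks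
lemma outer_loop_shape (sequence : List Int) (l m : List Int) :
    ∀ (acc : List String × List Bool),
    l.foldl (fun acc ei =>
      m.foldl (fun acc ej =>
        if ei == ej then acc
        else
          let ei_indices := (((PySem.List.enumerate sequence).filter (fun p => p.2 == ei)).map (fun p => p.1)) ++ [(-1 : Int)]
          let ej_indices := (((PySem.List.enumerate sequence).filter (fun p => p.2 == ej)).map (fun p => p.1)) ++ [(-1 : Int)]
          let last_ei := (PySem.List.max? ei_indices (fun x => x)).getD (-1)
          let last_ej := (PySem.List.max? ej_indices (fun x => x)).getD (-1)
          let a_before_b := !(sequence.contains ej) || decide (last_ej > last_ei)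
          let response_a_b := decide (last_ei ≤ last_ej)
          (acc.1 ++ ["succession_" ++ PySem.Int.toStr ei ++ "_" ++ PySem.Int.toStr ej],
           acc.2 ++ [response_a_b && a_before_b])) acc) acc
    = (acc.1 ++ l.flatMap (fun ei => (m.filter (fun ej => !(ei == ej))).map (featA ei)),
       acc.2 ++ l.flatMap (fun ei => (m.filter (fun ej => !(ei == ej))).map (valA sequence ei))) := by
  induction l with
  | nil => intro acc; simp
  | cons y t ih =>
      intro acc
      rw [List.foldl_cons, inner_loop_shape sequence y m acc, ih, List.flatMap_cons,
        List.flatMap_cons, List.append_assoc, List.append_assoc]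

theorem succession_spec : Claim_equal_succession := by
  intro events sequence _
  rw [Spec_succession, succession, succession_alt,
    outer_loop_shape sequence (PySem.List.sorted events (fun x => x) false)
      (PySem.List.sorted events (fun x => x) false) ([], [])]
  simp only [List.nil_append, List.map_flatMap, List.map_map]
  rw [Prod.mk.injEq]
  constructor
  · -- features agree: identical strings, pair by pair
    congr 1
  · -- values agree: valA = the lastB comparison on every kept (ei, ej)
    congr 1
    funext ei
    apply List.map_congr_left
    intro ej hmem
    have hne : ei ≠ ej := by
      have := (List.mem_filter.mp hmem).2
      simpa using this
    rw [valA_eq sequence ei ej hne]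
    rfl
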